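-- pv_equiv track=rewrite | github.com/yorsneef/aoc | day1.py | part2
-- ===== SOURCE A (Python) =====
-- def part1(data):
--     total = 0
--     # For each line in data
--     for line in data:
--         # Get list of all digits in the line
--         digits = [int(character) for character in line if character.isdigit()]
--         # Add first digit times 10 plus the last digit for each line
--         total += (digits[0] * 10) + digits[-1]
--     return total
--
-- def part2(data):
--     # List of words to map to their integer counterparts
--     mappings = ["one", "two", "three", "four", "five", "six", "seven", "eight", "nine"]
--     new_data = []
--     # For each line in data
--     for line in data:
--         new_line = []
--         # Go through each character
--         for i in range(len(line)):
--             # For each word in mappings, check if the line starts with it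
--             mapped_digit = "".join([str(index) for index, word in enumerate(mappings, 1) if line[i:].startswith(word)])
--             # If the word was found, add the mapped digit, else add the original character
--             new_line.append(mapped_digit if mapped_digit else line[i])
--         new_data.append(new_line)
--     # Use the part1 function to calculate the total for new_data
--     return part1(new_data)
-- ===== SOURCE B (Python) =====
-- WORDS = ["one", "two", "three", "four", "five", "six", "seven", "eight", "nine"]
--
--
-- def digit_at(line, i):
--     # digit value at position i: a spelled-out word starting here, or a digit character
--     for value, word in enumerate(WORDS, 1):
--         if line.startswith(word, i):
--             return value
--     c = line[i]
--     return int(c) if c.isdigit() else None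
--
--
-- def part2(data):
--     total = 0
--     for line in data:
--         first = next(d for i in range(len(line)) if (d := digit_at(line, i)) is not None)
--         last = next(d for i in range(len(line) - 1, -1, -1) if (d := digit_at(line, i)) is not None)
--         total += first * 10 + last
--     return total
-- ===== Notes on version B (the rewrite author's own statement) =====
-- stated objective: simpler
-- what changed: B drops A's whole line-rewriting pass (building new_line per position and re-scanning it with part1): a digit_at(line,i) helper is scanned left-to-right for the first digit and right-to-left (early exit) for the last, summing first*10+last directly.
import Mathlib
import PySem

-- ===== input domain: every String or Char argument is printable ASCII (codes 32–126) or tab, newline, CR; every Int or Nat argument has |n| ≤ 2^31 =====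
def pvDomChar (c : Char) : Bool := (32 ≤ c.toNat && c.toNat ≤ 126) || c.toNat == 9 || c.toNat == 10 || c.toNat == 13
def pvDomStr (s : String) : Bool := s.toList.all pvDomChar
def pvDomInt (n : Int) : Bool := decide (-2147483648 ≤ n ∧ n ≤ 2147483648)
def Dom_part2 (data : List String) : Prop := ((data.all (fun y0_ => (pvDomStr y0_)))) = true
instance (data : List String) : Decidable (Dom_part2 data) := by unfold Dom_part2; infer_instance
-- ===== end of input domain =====

-- B re-implements part2 without the line-rewriting pass: a digit_at helper plus two
-- early-exit scans (left for the first digit, right for the last) replace A's full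
-- transform of every line followed by part1's re-scan; objective: simpler.

-- ===== PORT A =====
def pvMappings : List String := ["one", "two", "three", "four", "five", "six", "seven", "eight", "nine"]

-- A's inner comprehension: "".join([str(index) for index, word in enumerate(mappings, 1) if line[i:].startswith(word)])
def pvMappedDigit (line : String) (i : Int) : String :=
  PySem.Str.join "" (((PySem.List.enumerate pvMappings 1).filter
      (fun p => PySem.Str.startswith (PySem.Str.slice line (some i) none) p.2)).map
    (fun p => PySem.Int.toStr p.1))

-- one element of new_line: mapped_digit if mapped_digit else line[i]  (line[i] is a 1-char str)
def pvEntryA (line : String) (i : Int) : String :=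
  if pvMappedDigit line i ≠ "" then pvMappedDigit line i
  else ((PySem.Str.pyGet? line i).map (fun c => String.ofList [c])).getD ""

-- the inner 'for i in range(len(line)): new_line.append(...)' loop
def pvNewLine (line : String) : List String :=
  (PySem.List.pyRange 0 (PySem.Str.len line) 1).foldl (fun nl i => nl ++ [pvEntryA line i]) []

-- A's part1, at the type it is used at in part2: a list of lines, each a list of strings.
-- digits[0] / digits[-1] raise IndexError on a digit-less line: excluded by Pre_part2 (pyGetD defaults are never reached under it).
def pvPart1 (data : List (List String)) : Int :=
  data.foldl (fun total line =>
    let digits : List Int := (line.filter (fun ch => PySem.Str.strIsdigit ch)).map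
      (fun ch => (PySem.Int.ofStr? ch).getD 0)
    total + (PySem.List.pyGetD digits 0 0 * 10 + PySem.List.pyGetD digits (-1) 0)) 0

def part2 (data : List String) : Int :=
  pvPart1 (data.foldl (fun nd line => nd ++ [pvNewLine line]) [])

-- ===== PORT B =====
def pvWords : List String := ["one", "two", "three", "four", "five", "six", "seven", "eight", "nine"]

-- B's digit_at(line, i): first spelled-out word starting at i (line.startswith(word, i)), else the digit character.
-- int(c) is PySem.Int.ofChars? [c]; callers only pass i < len(line), so the getD ' ' default is never reached.
def pvDigitAt (line : List Char) (i : Nat) : Option Int :=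
  match (PySem.List.enumerate pvWords 1).find? (fun p => PySem.Chars.startswith (line.drop i) p.2.toList) with
  | some p => some p.1
  | none =>
      let c := line.getD i ' '
      if PySem.Chars.isdigit c then PySem.Int.ofChars? [c] else none

-- next(d for i in range(len(line)) if (d := digit_at(line, i)) is not None)
def pvFirstDigit (line : List Char) : Option Int :=
  (PySem.List.pyRange 0 (line.length : Int) 1).findSome? (fun i => pvDigitAt line i.toNat)

-- next(d for i in range(len(line) - 1, -1, -1) if (d := digit_at(line, i)) is not None)
def pvLastDigit (line : List Char) : Option Int :=
  (PySem.List.pyRange ((line.length : Int) - 1) (-1) (-1)).findSome? (fun i => pvDigitAt line i.toNat)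

-- next() raises StopIteration on a digit-less line: excluded by Pre_part2 (the getD 0 defaults are never reached under it).
def part2_alt (data : List String) : Int :=
  data.foldl (fun total line =>
    total + ((pvFirstDigit line.toList).getD 0 * 10 + (pvLastDigit line.toList).getD 0)) 0

-- ===== PRECONDITION & SPEC =====
-- Pre_ excludes exactly the inputs on which A raises IndexError (part1's digits[0] on a line
-- containing neither a digit character nor a spelled-out digit word); B raises StopIteration there.
def Pre_part2 (data : List String) : Prop :=
  ∀ line ∈ data, (line.toList.any PySem.Chars.isdigit
    || pvWords.any (fun w => PySem.Chars.isIn w.toList line.toList)) = true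
instance (data : List String) : Decidable (Pre_part2 data) := by unfold Pre_part2; infer_instance

def pvWitness_part2 : List String := ["a1b2", "two"]

def Spec_part2 (data : List String) (out : Int) : Prop := out = part2_alt data
instance (data : List String) (out : Int) : Decidable (Spec_part2 data out) := by unfold Spec_part2; infer_instance

-- ===== CLAIM (what is proved, stated in full; the proofs are below) =====
def Claim_equal_part2 : Prop := ∀ (data : List String), Dom_part2 data → Pre_part2 data → Spec_part2 data (part2 data)

-- ===== LEMMAS AND PROOFS =====

lemma pvEnum_eq : PySem.List.enumerate pvWords 1 =
    [(1, "one"), (2, "two"), (3, "three"), (4, "four"), (5, "five"), (6, "six"), (7, "seven"), (8, "eight"), (9, "nine")] := by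
  decide

lemma pvEnumM_eq : PySem.List.enumerate pvMappings 1 =
    [(1, "one"), (2, "two"), (3, "three"), (4, "four"), (5, "five"), (6, "six"), (7, "seven"), (8, "eight"), (9, "nine")] := by
  decide

-- at most one digit word starts at a given position: the matches of A's comprehension are
-- exactly the (at most one) first match
lemma pvMatches_eq (t : List Char) :
    (PySem.List.enumerate pvMappings 1).filter (fun p => PySem.Chars.startswith t p.2.toList) =
    ((PySem.List.enumerate pvMappings 1).find? (fun p => PySem.Chars.startswith t p.2.toList)).toList := by
  rw [pvEnumM_eq]
  by_cases h1 : PySem.Chars.startswith t ['o', 'n', 'e'] = true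
  · obtain ⟨u, rfl⟩ : ∃ u, t = ['o', 'n', 'e'] ++ u := by
      have hp := (List.isPrefixOf_iff_prefix (l₁ := ['o', 'n', 'e']) (l₂ := t)).mp h1
      exact ⟨hp.choose, hp.choose_spec.symm⟩
    simp [PySem.Chars.startswith, List.isPrefixOf, List.filter, List.find?]
  ·
    by_cases h2 : PySem.Chars.startswith t ['t', 'w', 'o'] = true
    · obtain ⟨u, rfl⟩ : ∃ u, t = ['t', 'w', 'o'] ++ u := by
        have hp := (List.isPrefixOf_iff_prefix (l₁ := ['t', 'w', 'o']) (l₂ := t)).mp h2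
        exact ⟨hp.choose, hp.choose_spec.symm⟩
      simp [PySem.Chars.startswith, List.isPrefixOf, List.filter, List.find?]
    ·
      by_cases h3 : PySem.Chars.startswith t ['t', 'h', 'r', 'e', 'e'] = true
      · obtain ⟨u, rfl⟩ : ∃ u, t = ['t', 'h', 'r', 'e', 'e'] ++ u := by
          have hp := (List.isPrefixOf_iff_prefix (l₁ := ['t', 'h', 'r', 'e', 'e']) (l₂ := t)).mp h3
          exact ⟨hp.choose, hp.choose_spec.symm⟩
        simp [PySem.Chars.startswith, List.isPrefixOf, List.filter, List.find?]
      ·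
        by_cases h4 : PySem.Chars.startswith t ['f', 'o', 'u', 'r'] = true
        · obtain ⟨u, rfl⟩ : ∃ u, t = ['f', 'o', 'u', 'r'] ++ u := by
            have hp := (List.isPrefixOf_iff_prefix (l₁ := ['f', 'o', 'u', 'r']) (l₂ := t)).mp h4
            exact ⟨hp.choose, hp.choose_spec.symm⟩
          simp [PySem.Chars.startswith, List.isPrefixOf, List.filter, List.find?]
        ·
          by_cases h5 : PySem.Chars.startswith t ['f', 'i', 'v', 'e'] = true
          · obtain ⟨u, rfl⟩ : ∃ u, t = ['f', 'i', 'v', 'e'] ++ u := by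
              have hp := (List.isPrefixOf_iff_prefix (l₁ := ['f', 'i', 'v', 'e']) (l₂ := t)).mp h5
              exact ⟨hp.choose, hp.choose_spec.symm⟩
            simp [PySem.Chars.startswith, List.isPrefixOf, List.filter, List.find?]
          ·
            by_cases h6 : PySem.Chars.startswith t ['s', 'i', 'x'] = true
            · obtain ⟨u, rfl⟩ : ∃ u, t = ['s', 'i', 'x'] ++ u := by
                have hp := (List.isPrefixOf_iff_prefix (l₁ := ['s', 'i', 'x']) (l₂ := t)).mp h6
                exact ⟨hp.choose, hp.choose_spec.symm⟩
              simp [PySem.Chars.startswith, List.isPrefixOf, List.filter, List.find?]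
            ·
              by_cases h7 : PySem.Chars.startswith t ['s', 'e', 'v', 'e', 'n'] = true
              · obtain ⟨u, rfl⟩ : ∃ u, t = ['s', 'e', 'v', 'e', 'n'] ++ u := by
                  have hp := (List.isPrefixOf_iff_prefix (l₁ := ['s', 'e', 'v', 'e', 'n']) (l₂ := t)).mp h7
                  exact ⟨hp.choose, hp.choose_spec.symm⟩
                simp [PySem.Chars.startswith, List.isPrefixOf, List.filter, List.find?]
              ·
                by_cases h8 : PySem.Chars.startswith t ['e', 'i', 'g', 'h', 't'] = true
                · obtain ⟨u, rfl⟩ : ∃ u, t = ['e', 'i', 'g', 'h', 't'] ++ u := by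
                    have hp := (List.isPrefixOf_iff_prefix (l₁ := ['e', 'i', 'g', 'h', 't']) (l₂ := t)).mp h8
                    exact ⟨hp.choose, hp.choose_spec.symm⟩
                  simp [PySem.Chars.startswith, List.isPrefixOf, List.filter, List.find?]
                ·
                  by_cases h9 : PySem.Chars.startswith t ['n', 'i', 'n', 'e'] = true
                  · obtain ⟨u, rfl⟩ : ∃ u, t = ['n', 'i', 'n', 'e'] ++ u := by
                      have hp := (List.isPrefixOf_iff_prefix (l₁ := ['n', 'i', 'n', 'e']) (l₂ := t)).mp h9
                      exact ⟨hp.choose, hp.choose_spec.symm⟩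
                    simp [PySem.Chars.startswith, List.isPrefixOf, List.filter, List.find?]
                  ·
                    simp [List.filter, List.find?, h1, h2, h3, h4, h5, h6, h7, h8, h9]

lemma pvDigitChar (c : Char) (h : PySem.Chars.isdigit c = true) :
    PySem.Int.ofChars? [c] = some ((c.toNat : Int) - 48) := by
  simp [PySem.Chars.isdigit, Char.le_def, UInt32.le_iff_toNat_le] at h
  have hv : 48 ≤ c.toNat ∧ c.toNat ≤ 57 := by unfold Char.toNat; exact h
  have hofn := Char.ofNat_toNat c
  have h48 : c.toNat = 48 ∨ c.toNat = 49 ∨ c.toNat = 50 ∨ c.toNat = 51 ∨ c.toNat = 52 ∨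
      c.toNat = 53 ∨ c.toNat = 54 ∨ c.toNat = 55 ∨ c.toNat = 56 ∨ c.toNat = 57 := by omega
  rcases h48 with h|h|h|h|h|h|h|h|h|h <;> rw [h] at hofn <;> rw [← hofn] <;> decide

-- A's treatment of position k of a line equals B's digit_at
lemma pvEntry_spec (line : String) (k : Nat) (hk : k < line.toList.length) :
    (if PySem.Str.strIsdigit (pvEntryA line (k : Int)) = true
      then some ((PySem.Int.ofStr? (pvEntryA line (k : Int))).getD 0) else none) =
    pvDigitAt line.toList k := by
  have hslice : (PySem.Str.slice line (some (k : Int)) none).toList = line.toList.drop k := by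
    simp [PySem.Str.toList_slice, PySem.List.slice_from_natCast]
  have hpred : (fun p : Int × String => PySem.Str.startswith (PySem.Str.slice line (some (k : Int)) none) p.2)
      = (fun p : Int × String => PySem.Chars.startswith (line.toList.drop k) p.2.toList) := by
    funext p
    show PySem.Chars.startswith (PySem.Str.slice line (some (k : Int)) none).toList p.2.toList = _
    rw [hslice]
  unfold pvDigitAt pvEntryA pvMappedDigit
  rw [show pvWords = pvMappings from rfl, hpred, pvMatches_eq (line.toList.drop k)]
  cases hf : (PySem.List.enumerate pvMappings 1).find?
      (fun p : Int × String => PySem.Chars.startswith (line.toList.drop k) p.2.toList) with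
  | none =>
    simp only [Option.toList, List.map_nil]
    have hj : PySem.Str.join "" ([] : List String) = "" := by decide
    rw [hj]
    have hget : PySem.Str.pyGet? line (k : Int) = some line.toList[k] := by
      simp [List.getElem?_eq_getElem hk]
    rw [hget]
    have hgd : line.toList.getD k ' ' = line.toList[k] := List.getD_eq_getElem _ _ hk
    simp only [ne_eq, not_true_eq_false, if_false, Option.map_some, Option.getD_some, hgd]
    have hsd : PySem.Str.strIsdigit (String.ofList [line.toList[k]]) =
        PySem.Chars.isdigit line.toList[k] := by
      simp [PySem.Str.strIsdigit, PySem.Chars.strIsdigit]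
    by_cases hd : PySem.Chars.isdigit line.toList[k] = true
    · rw [if_pos hd]
      have := pvDigitChar _ hd
      simp [PySem.Chars.strIsdigit, hd, PySem.Int.ofStr?, this]
    · rw [if_neg hd]
      simp [PySem.Chars.strIsdigit, hd]
  | some p =>
    have hmem := List.mem_of_find?_eq_some hf
    rw [pvEnumM_eq] at hmem
    simp only [List.mem_cons, List.not_mem_nil, or_false] at hmem
    simp only [Option.toList, List.map_cons, List.map_nil]
    rcases hmem with h|h|h|h|h|h|h|h|h
    · subst h
      simp [show PySem.Str.join "" [PySem.Int.toStr 1] = "1" from by decide,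
        show PySem.Chars.strIsdigit ['1'] = true from by decide,
        show PySem.Int.ofStr? "1" = some 1 from by decide]
    · subst h
      simp [show PySem.Str.join "" [PySem.Int.toStr 2] = "2" from by decide,
        show PySem.Chars.strIsdigit ['2'] = true from by decide,
        show PySem.Int.ofStr? "2" = some 2 from by decide]
    · subst h
      simp [show PySem.Str.join "" [PySem.Int.toStr 3] = "3" from by decide,
        show PySem.Chars.strIsdigit ['3'] = true from by decide,
        show PySem.Int.ofStr? "3" = some 3 from by decide]
    · subst h
      simp [show PySem.Str.join "" [PySem.Int.toStr 4] = "4" from by decide,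
        show PySem.Chars.strIsdigit ['4'] = true from by decide,
        show PySem.Int.ofStr? "4" = some 4 from by decide]
    · subst h
      simp [show PySem.Str.join "" [PySem.Int.toStr 5] = "5" from by decide,
        show PySem.Chars.strIsdigit ['5'] = true from by decide,
        show PySem.Int.ofStr? "5" = some 5 from by decide]
    · subst h
      simp [show PySem.Str.join "" [PySem.Int.toStr 6] = "6" from by decide,
        show PySem.Chars.strIsdigit ['6'] = true from by decide,
        show PySem.Int.ofStr? "6" = some 6 from by decide]
    · subst h
      simp [show PySem.Str.join "" [PySem.Int.toStr 7] = "7" from by decide,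
        show PySem.Chars.strIsdigit ['7'] = true from by decide,
        show PySem.Int.ofStr? "7" = some 7 from by decide]
    · subst h
      simp [show PySem.Str.join "" [PySem.Int.toStr 8] = "8" from by decide,
        show PySem.Chars.strIsdigit ['8'] = true from by decide,
        show PySem.Int.ofStr? "8" = some 8 from by decide]
    · subst h
      simp [show PySem.Str.join "" [PySem.Int.toStr 9] = "9" from by decide,
        show PySem.Chars.strIsdigit ['9'] = true from by decide,
        show PySem.Int.ofStr? "9" = some 9 from by decide]

lemma pvMapFilterMap {α β γ : Type} (l : List α) (f : α → β) (q : β → Bool) (g : β → γ) :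
    ((l.map f).filter q).map g = l.filterMap (fun a => if q (f a) then some (g (f a)) else none) := by
  induction l with
  | nil => rfl
  | cons a t ih => by_cases h : q (f a) <;> simp [h, ih]

lemma pvNewLine_eq (line : String) :
    pvNewLine line = (List.range line.toList.length).map (fun k : Nat => pvEntryA line (k : Int)) := by
  unfold pvNewLine
  rw [PySem.List.foldl_append_singleton_eq_map, List.nil_append, PySem.List.pyRange_one, List.map_map]
  simp [PySem.Str.len]

-- A's per-line digit list is the filterMap of B's digit_at over all positions
lemma pvDigits_eq (line : String) :
    ((pvNewLine line).filter (fun ch => PySem.Str.strIsdigit ch)).map (fun ch => (PySem.Int.ofStr? ch).getD 0) =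
    (List.range line.toList.length).filterMap (fun k => pvDigitAt line.toList k) := by
  rw [pvNewLine_eq, pvMapFilterMap (List.range line.toList.length)
    (fun k : Nat => pvEntryA line (k : Int)) (fun ch => PySem.Str.strIsdigit ch)
    (fun ch => (PySem.Int.ofStr? ch).getD 0)]
  exact List.filterMap_congr (fun k hk => pvEntry_spec line k (List.mem_range.mp hk))

lemma pvFindSome?_filterMap {α β : Type} (l : List α) (f : α → Option β) :
    l.findSome? f = (l.filterMap f).head? := List.head?_filterMap.symm

lemma pvFirst_eq (line : String) :
    pvFirstDigit line.toList = ((List.range line.toList.length).filterMap (fun k => pvDigitAt line.toList k)).head? := by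
  unfold pvFirstDigit
  rw [PySem.List.pyRange_one, List.findSome?_map, pvFindSome?_filterMap]
  have : (↑line.toList.length - 0 : Int).toNat = line.toList.length := by simp
  rw [this]
  refine congrArg _ (List.filterMap_congr ?_)
  intro k hk
  simp [Function.comp]

lemma pvLast_eq (line : String) :
    pvLastDigit line.toList = ((List.range line.toList.length).filterMap (fun k => pvDigitAt line.toList k)).getLast? := by
  unfold pvLastDigit
  rw [PySem.List.pyRange_neg_one_eq_reverse]
  have h1 : ((line.toList.length : Int) - 1) + 1 = (line.toList.length : Int) := by ring
  rw [h1]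
  have h0 : (-1 : Int) + 1 = 0 := by norm_num
  rw [h0, PySem.List.pyRange_one]
  have : (↑line.toList.length - 0 : Int).toNat = line.toList.length := by simp
  rw [this, ← List.map_reverse, List.findSome?_map, pvFindSome?_filterMap, List.filterMap_reverse,
    List.head?_reverse]
  refine congrArg _ (List.filterMap_congr ?_)
  intro k hk
  simp [Function.comp]

lemma pvDigitAt_ne_none_of_digit (cs : List Char) (k : Nat) (hk : k < cs.length)
    (hd : PySem.Chars.isdigit cs[k] = true) : pvDigitAt cs k ≠ none := by
  unfold pvDigitAt
  cases hf : (PySem.List.enumerate pvWords 1).find?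
      (fun p : Int × String => PySem.Chars.startswith (cs.drop k) p.2.toList) with
  | some p => simp
  | none =>
    simp [List.getElem?_eq_getElem hk, hd, pvDigitChar _ hd]

lemma pvWord_mem (w : String) (hw : w ∈ pvWords) :
    ∃ v : Int, (v, w) ∈ PySem.List.enumerate pvWords 1 := by
  rw [pvEnum_eq]
  rcases (by simpa [pvWords] using hw : w = "one" ∨ w = "two" ∨ w = "three" ∨ w = "four" ∨
      w = "five" ∨ w = "six" ∨ w = "seven" ∨ w = "eight" ∨ w = "nine") with
    h|h|h|h|h|h|h|h|h <;> subst h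
  exacts [⟨1, by decide⟩, ⟨2, by decide⟩, ⟨3, by decide⟩, ⟨4, by decide⟩, ⟨5, by decide⟩,
    ⟨6, by decide⟩, ⟨7, by decide⟩, ⟨8, by decide⟩, ⟨9, by decide⟩]

lemma pvDigitAt_ne_none_of_word (cs : List Char) (j : Nat) (v : Int) (w : String)
    (hmem : (v, w) ∈ PySem.List.enumerate pvWords 1) (hpre : w.toList <+: cs.drop j) :
    pvDigitAt cs j ≠ none := by
  unfold pvDigitAt
  cases hf : (PySem.List.enumerate pvWords 1).find?
      (fun p : Int × String => PySem.Chars.startswith (cs.drop j) p.2.toList) with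
  | some p => simp
  | none =>
    exfalso
    have := List.find?_eq_none.mp hf (v, w) hmem
    apply this
    show PySem.Chars.startswith (cs.drop j) w.toList = true
    simp [PySem.Chars.startswith]
    exact hpre

-- a line admitted by Pre_ has at least one digit position
lemma pvPre_nonempty (line : String)
    (h : (line.toList.any PySem.Chars.isdigit
      || pvWords.any (fun w => PySem.Chars.isIn w.toList line.toList)) = true) :
    (List.range line.toList.length).filterMap (fun k => pvDigitAt line.toList k) ≠ [] := by
  intro hnil
  simp only [Bool.or_eq_true, List.any_eq_true] at h
  rw [List.filterMap_eq_nil_iff] at hnil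
  rcases h with ⟨c, hc, hd⟩ | ⟨w, hw, hin⟩
  · obtain ⟨k, hk, rfl⟩ := List.getElem_of_mem hc
    exact pvDigitAt_ne_none_of_digit line.toList k hk hd (hnil k (List.mem_range.mpr hk))
  · obtain ⟨j, hpre⟩ := (PySem.Chars.exists_prefix_drop_iff_isIn _ _).mpr hin
    have hwne : w.toList ≠ [] := by
      rcases (by simpa [pvWords] using hw : w = "one" ∨ w = "two" ∨ w = "three" ∨ w = "four" ∨
        w = "five" ∨ w = "six" ∨ w = "seven" ∨ w = "eight" ∨ w = "nine") with
        h|h|h|h|h|h|h|h|h <;> subst h <;> decide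
    obtain ⟨v, hmem⟩ := pvWord_mem w hw
    have hj : j < line.toList.length := by
      have hlen := hpre.length_le
      have hwl : 0 < w.toList.length := List.length_pos_iff.mpr hwne
      simp only [List.length_drop] at hlen
      omega
    exact pvDigitAt_ne_none_of_word line.toList j v w hmem hpre (hnil j (List.mem_range.mpr hj))

lemma pvLine_contrib (line : String)
    (h : (line.toList.any PySem.Chars.isdigit
      || pvWords.any (fun w => PySem.Chars.isIn w.toList line.toList)) = true) :
    PySem.List.pyGetD (((pvNewLine line).filter (fun ch => PySem.Str.strIsdigit ch)).map
        (fun ch => (PySem.Int.ofStr? ch).getD 0)) 0 0 * 10 +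
      PySem.List.pyGetD (((pvNewLine line).filter (fun ch => PySem.Str.strIsdigit ch)).map
        (fun ch => (PySem.Int.ofStr? ch).getD 0)) (-1) 0 =
    (pvFirstDigit line.toList).getD 0 * 10 + (pvLastDigit line.toList).getD 0 := by
  rw [pvDigits_eq, pvFirst_eq, pvLast_eq]
  have hne := pvPre_nonempty line h
  rw [PySem.List.pyGetD_zero, PySem.List.pyGetD_neg_one _ 0 hne]
  rw [List.getLast?_eq_some_getLast hne, Option.getD_some]
  rw [List.getD_eq_getElem?_getD, ← List.head?_eq_getElem?]

-- ===== VERDICT (by name: the statement is the Claim_ definition above) =====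
theorem part2_spec : Claim_equal_part2 := by
  intro data _hdom hpre
  unfold Spec_part2 part2 part2_alt
  rw [PySem.List.foldl_append_singleton_eq_map]
  unfold pvPart1
  rw [List.nil_append, List.foldl_map]
  apply PySem.List.foldl_congr_mem
  intro acc line hline
  show acc + _ = acc + _
  rw [pvLine_contrib line (hpre line hline)]
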